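-- pv_equiv track=rewrite | github.com/fafafrens/smash-vhlle-hybrid-python | src/hybrid_lib.py | snake_rule_files
-- ===== SOURCE A (Python) =====
-- def add_string_lists(str_list1, str_list2):
--     '''
--     Combines the two lists of strings in every possible way: ["a","b"]+["c","d"]=["ac","ad","bc","bd"]
--     if one of the lists is empty returns the non empty one.
--     Useful if you want to run combinations of multiple parameters, e.g. etaS and ecrit
--     '''
--     sum = []
--     if(str_list1 == []):
--         return str_list2
--     if (str_list2 == []):
--         return str_list1
--
--     for s1 in str_list1:
--         for s2 in str_list2:
--             sum.append(s1+s2)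
--
--     return sum
--
-- def snake_rule_files(dict):
--     '''
--     From a dictionary {key:[values]} where key and values are strings
--     returns a list of strings with the expected format for Snakemake.
--     Here the expected format used is "key1?value1?key2?value2?.txt"
--     '''
--     output = []
--     keys = dict.keys()
--     for key in keys:
--         temp_list = []
--         for value in dict[key]:
--             temp_list.append(key+"?"+value+"?")
--         output = add_string_lists(output,temp_list)
--     ###output is now a list of all the possible combintation of parameters and keys in dict
--
--     for i in range(len(output)):
--         filename = output[i]
--         output[i] = filename[:-1]+".txt"
--
--     return output
-- ===== SOURCE B (Python) =====
-- def snake_rule_files(dict):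
--     '''Same result as A: recursive Cartesian product over prebuilt non-empty segments.'''
--     segments = [[key + "?" + v + "?" for v in vals] for key, vals in dict.items() if vals]
--     if not segments:
--         return []
--
--     def combos(segs):
--         if not segs:
--             return [""]
--         return [p + rest for p in segs[0] for rest in combos(segs[1:])]
--
--     return [c[:-1] + ".txt" for c in combos(segments)]
-- ===== Notes on version B (the rewrite author's own statement) =====
-- stated objective: alternative
-- what changed: Replaces A's pairwise add_string_lists accumulator fold (with empty-list branch handling and an in-place final index loop) by prebuilding one key?value? segment list per key with a non-empty value list and taking their Cartesian product by structural recursion, then emitting filenames in one comprehension.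
import Mathlib
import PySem

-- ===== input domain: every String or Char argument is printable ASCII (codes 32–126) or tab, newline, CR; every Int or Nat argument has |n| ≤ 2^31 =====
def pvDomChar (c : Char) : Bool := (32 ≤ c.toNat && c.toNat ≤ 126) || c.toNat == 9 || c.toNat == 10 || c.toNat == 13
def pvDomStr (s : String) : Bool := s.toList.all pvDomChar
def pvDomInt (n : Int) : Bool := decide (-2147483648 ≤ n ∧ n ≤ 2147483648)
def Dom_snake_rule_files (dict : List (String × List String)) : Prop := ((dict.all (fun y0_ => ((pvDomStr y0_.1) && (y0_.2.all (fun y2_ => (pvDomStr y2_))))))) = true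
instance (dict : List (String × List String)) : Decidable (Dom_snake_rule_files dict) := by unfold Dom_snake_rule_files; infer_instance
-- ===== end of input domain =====

-- B replaces A's pairwise add_string_lists accumulator fold (with its empty-list branches and
-- in-place final rewrite) by one recursive Cartesian product over prebuilt non-empty segments:
-- objective 'alternative' (same asymptotic cost, different decomposition).

-- ===== PORT A =====
-- helper add_string_lists, transliterated branch for branch; the nested for-loops = nested foldl
def add_string_lists (str_list1 str_list2 : List String) : List String :=
  if str_list1 = [] then str_list2
  else if str_list2 = [] then str_list1
  else
    str_list1.foldl (fun sum s1 =>
      str_list2.foldl (fun sum s2 => sum ++ [s1 ++ s2]) sum) []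

def snake_rule_files (dict : List (String × List String)) : List String :=
  -- the Python parameter is a dict: build it with Python's overwrite semantics
  -- output = fold of add_string_lists over keys; temp_list = the inner append loop
  -- final loop:  for i in range(len(output)): output[i] = output[i][:-1] + ".txt"
  ((PySem.Dict.ofList dict).keys.foldl (fun output key =>
      add_string_lists output
        (((PySem.Dict.ofList dict).getD key []).foldl
          (fun t value => t ++ [key ++ "?" ++ value ++ "?"]) [])) []).map
    (fun filename => PySem.Str.slice filename none (some (-1)) ++ ".txt")

-- ===== PORT B =====
-- combos(segs): recursive Cartesian product; product of no segments = [""]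
def pvCombos (segs : List (List String)) : List String :=
  match segs with
  | [] => [""]
  | seg :: rest => seg.flatMap (fun p => (pvCombos rest).map (fun r => p ++ r))

def snake_rule_files_alt (dict : List (String × List String)) : List String :=
  -- segments = one key?v? list per key with a non-empty value list
  if ((PySem.Dict.ofList dict).items.filterMap (fun kv =>
      if kv.2 = [] then none else some (kv.2.map (fun v => kv.1 ++ "?" ++ v ++ "?")))) = [] then []
  else (pvCombos ((PySem.Dict.ofList dict).items.filterMap (fun kv =>
      if kv.2 = [] then none else some (kv.2.map (fun v => kv.1 ++ "?" ++ v ++ "?"))))).map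
    (fun c => PySem.Str.slice c none (some (-1)) ++ ".txt")

-- ===== PRECONDITION & SPEC =====
def Spec_snake_rule_files (dict : List (String × List String)) (out : List String) : Prop := out = snake_rule_files_alt dict
instance (dict : List (String × List String)) (out : List String) : Decidable (Spec_snake_rule_files dict out) := by unfold Spec_snake_rule_files; infer_instance

-- ===== CLAIM (what is proved, stated in full; the proofs are below) =====
def Claim_equal_snake_rule_files : Prop := ∀ (dict : List (String × List String)), Dom_snake_rule_files dict → Spec_snake_rule_files dict (snake_rule_files dict)

-- ===== LEMMAS AND PROOFS =====

-- the non-empty segments of an items list, exactly as B builds them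
def pvSegs (items : List (String × List String)) : List (List String) :=
  items.filterMap (fun kv =>
    if kv.2 = [] then none else some (kv.2.map (fun v => kv.1 ++ "?" ++ v ++ "?")))

-- A's nested product loop with a general accumulator
theorem foldl_prod_append (l1 l2 acc : List String) :
    l1.foldl (fun sum s1 => l2.foldl (fun sum s2 => sum ++ [s1 ++ s2]) sum) acc
    = acc ++ l1.flatMap (fun s1 => l2.map (fun s2 => s1 ++ s2)) := by
  induction l1 generalizing acc with
  | nil => simp
  | cons a t ih =>
    simp only [List.foldl_cons, List.flatMap_cons]
    rw [PySem.List.foldl_append_singleton_eq_map (fun s2 => a ++ s2) l2 acc, ih]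
    simp

theorem add_string_lists_eq_flatMap (l1 l2 : List String) (h1 : l1 ≠ []) (h2 : l2 ≠ []) :
    add_string_lists l1 l2 = l1.flatMap (fun s1 => l2.map (fun s2 => s1 ++ s2)) := by
  unfold add_string_lists
  rw [if_neg h1, if_neg h2, foldl_prod_append]
  simp

theorem flatMap_ne_nil {α β : Type} (l : List α) (f : α → List β)
    (h : l ≠ []) (hf : ∀ a ∈ l, f a ≠ []) : l.flatMap f ≠ [] := by
  cases l with
  | nil => exact absurd rfl h
  | cons a t =>
    have := hf a (by simp)
    simp only [List.flatMap_cons, ne_eq, List.append_eq_nil_iff]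
    intro ⟨h1, _⟩; exact this h1

-- reassociating a product of three factors (α for A, β for B's segment prefix)
theorem prodAssoc (A B C : List String) :
    (A.flatMap (fun s => B.map (fun p => s ++ p))).flatMap (fun t => C.map (fun r => t ++ r))
    = A.flatMap (fun s => (B.flatMap (fun p => C.map (fun r => p ++ r))).map (fun r => s ++ r)) := by
  simp [List.flatMap_assoc, List.flatMap_map, List.map_flatMap, List.map_map,
    Function.comp_def, String.append_assoc]

-- A's fold from a NON-empty accumulator is acc × combos(segments)
theorem foldA_inv (items : List (String × List String)) (acc : List String) (hacc : acc ≠ []) :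
    items.foldl (fun output kv =>
      add_string_lists output (kv.2.map (fun v => kv.1 ++ "?" ++ v ++ "?"))) acc
    = acc.flatMap (fun s => (pvCombos (pvSegs items)).map (fun r => s ++ r)) := by
  induction items generalizing acc with
  | nil => simp [pvSegs, pvCombos]
  | cons kv rest ih =>
    by_cases hv : kv.2 = []
    · have hstep : add_string_lists acc (kv.2.map (fun v => kv.1 ++ "?" ++ v ++ "?")) = acc := by
        simp [add_string_lists, hv, hacc]
      simp only [List.foldl_cons]
      rw [hstep, ih acc hacc,
        show pvSegs (kv :: rest) = pvSegs rest from by simp [pvSegs, hv]]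
    · have hseg : (kv.2.map (fun v => kv.1 ++ "?" ++ v ++ "?")) ≠ [] := by simp [hv]
      have hstep := add_string_lists_eq_flatMap acc _ hacc hseg
      have hacc' : add_string_lists acc (kv.2.map (fun v => kv.1 ++ "?" ++ v ++ "?")) ≠ [] := by
        rw [hstep]
        exact flatMap_ne_nil _ _ hacc (fun a _ => by simp [hv])
      simp only [List.foldl_cons]
      rw [ih _ hacc', hstep]
      have hsegs : pvSegs (kv :: rest)
          = (kv.2.map (fun v => kv.1 ++ "?" ++ v ++ "?")) :: pvSegs rest := by
        simp [pvSegs, hv]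
      rw [hsegs]
      exact prodAssoc _ _ _

-- A's fold from the EMPTY accumulator
theorem foldA_nil (items : List (String × List String)) :
    items.foldl (fun output kv =>
      add_string_lists output (kv.2.map (fun v => kv.1 ++ "?" ++ v ++ "?"))) []
    = if pvSegs items = [] then [] else pvCombos (pvSegs items) := by
  induction items with
  | nil => simp [pvSegs]
  | cons kv rest ih =>
    by_cases hv : kv.2 = []
    · have hstep : add_string_lists [] (kv.2.map (fun v => kv.1 ++ "?" ++ v ++ "?")) = [] := by
        simp [add_string_lists, hv]
      simp only [List.foldl_cons]
      rw [hstep, ih,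
        show pvSegs (kv :: rest) = pvSegs rest from by simp [pvSegs, hv]]
    · have hseg : (kv.2.map (fun v => kv.1 ++ "?" ++ v ++ "?")) ≠ [] := by simp [hv]
      have hstep : add_string_lists [] (kv.2.map (fun v => kv.1 ++ "?" ++ v ++ "?"))
          = kv.2.map (fun v => kv.1 ++ "?" ++ v ++ "?") := by
        simp [add_string_lists]
      have hsegs : pvSegs (kv :: rest)
          = (kv.2.map (fun v => kv.1 ++ "?" ++ v ++ "?")) :: pvSegs rest := by
        simp [pvSegs, hv]
      simp only [List.foldl_cons]
      rw [hstep, foldA_inv rest _ hseg, hsegs]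
      simp [pvCombos]

-- A's keys-loop (with its inner temp_list loop) IS pvFoldA over the dict's items
theorem keysFold_eq_foldA (d : PySem.Dict String (List String)) (hnd : d.keys.Nodup) :
    d.keys.foldl (fun output key =>
      add_string_lists output
        ((d.getD key []).foldl (fun t value => t ++ [key ++ "?" ++ value ++ "?"]) [])) []
    = d.items.foldl (fun output kv =>
        add_string_lists output (kv.2.map (fun v => kv.1 ++ "?" ++ v ++ "?"))) [] := by
  rw [PySem.Dict.items_eq_map_keys d hnd [], List.foldl_map]
  simp only [PySem.List.foldl_append_singleton_eq_map, List.nil_append]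

-- ===== VERDICT (by name: the statement is the Claim_ definition above) =====
theorem snake_rule_files_spec : Claim_equal_snake_rule_files := by
  intro dict _
  unfold Spec_snake_rule_files snake_rule_files snake_rule_files_alt
  have hsegs : (PySem.Dict.ofList dict).items.filterMap (fun kv =>
      if kv.2 = [] then none else some (kv.2.map (fun v => kv.1 ++ "?" ++ v ++ "?")))
      = pvSegs (PySem.Dict.ofList dict).items := rfl
  rw [keysFold_eq_foldA _ (PySem.Dict.nodup_keys_ofList dict), foldA_nil, hsegs]
  by_cases h : pvSegs (PySem.Dict.ofList dict).items = [] <;> simp [h]
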